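-- pv_equiv track=rewrite | github.com/bloopdloop/family_graph | scripts/add_reciprocal_relationships.py | compute_missing_reciprocals
-- ===== SOURCE A (Python) =====
-- from collections import defaultdict
-- from typing import Dict, List, Set
--
-- RECIPROCAL = {
--     'parent': 'child',
--     'child': 'parent',
--     'wife': 'husband',
--     'husband': 'wife',
--     'sibling': 'sibling'  # Sibling is symmetric
-- }
--
-- def compute_missing_reciprocals(graph: Dict) -> Dict[str, Dict[str, Set[str]]]:
--     """
--     Find missing reciprocal relationships.
--     Returns: {person_name: {rel_type_to_add: {names_to_add}}}
--     """
--     missing = defaultdict(lambda: defaultdict(set))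
--
--     for person, relationships in list(graph.items()):
--         for rel_type, related_people in relationships.items():
--             reciprocal_type = RECIPROCAL.get(rel_type)
--             if not reciprocal_type:
--                 continue
--
--             for related_person in related_people:
--                 # Check if related_person has reciprocal relationship back to person
--                 if person not in graph[related_person].get(reciprocal_type, []):
--                     # Missing reciprocal relationship!
--                     missing[related_person][reciprocal_type].add(person)
--
--     return missing
-- ===== SOURCE B (Python) =====
-- from collections import defaultdict
--
-- RECIPROCAL = {
--     'parent': 'child',
--     'child': 'parent',
--     'wife': 'husband',
--     'husband': 'wife',
--     'sibling': 'sibling'  # Sibling is symmetric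
-- }
--
-- def compute_missing_reciprocals(graph):
--     """
--     Find missing reciprocal relationships, as an edge-set difference:
--     collect every existing directed edge and every required reciprocal
--     edge in one pass, then group the required edges that do not exist.
--     """
--     existing = set()
--     required = []  # (person_owing_edge, rel_type_to_add, name_to_add), in traversal order
--     for person, relationships in graph.items():
--         for rel_type, related_people in relationships.items():
--             reciprocal_type = RECIPROCAL.get(rel_type)
--             for related_person in related_people:
--                 existing.add((person, rel_type, related_person))
--                 if reciprocal_type:
--                     required.append((related_person, reciprocal_type, person))
--     missing = defaultdict(lambda: defaultdict(set))
--     for b, rel, a in required: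
--         if (b, rel, a) not in existing:
--             missing[b][rel].add(a)
--     return missing
-- ===== Notes on version B (the rewrite author's own statement) =====
-- stated objective: alternative
-- what changed: B replaces A's per-edge reverse lookup inside the nested loop by a two-phase edge-set decomposition: one pass collects the set of existing directed edges and the list of required reciprocal edges, then a flat second loop groups the required edges that are not in the existing set.
-- outside the precondition, e.g. on compute_missing_reciprocals({'x': {'parent': {'y'}}}): A raises KeyError, B returns {'y': {'child': {'x'}}}
import Mathlib
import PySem

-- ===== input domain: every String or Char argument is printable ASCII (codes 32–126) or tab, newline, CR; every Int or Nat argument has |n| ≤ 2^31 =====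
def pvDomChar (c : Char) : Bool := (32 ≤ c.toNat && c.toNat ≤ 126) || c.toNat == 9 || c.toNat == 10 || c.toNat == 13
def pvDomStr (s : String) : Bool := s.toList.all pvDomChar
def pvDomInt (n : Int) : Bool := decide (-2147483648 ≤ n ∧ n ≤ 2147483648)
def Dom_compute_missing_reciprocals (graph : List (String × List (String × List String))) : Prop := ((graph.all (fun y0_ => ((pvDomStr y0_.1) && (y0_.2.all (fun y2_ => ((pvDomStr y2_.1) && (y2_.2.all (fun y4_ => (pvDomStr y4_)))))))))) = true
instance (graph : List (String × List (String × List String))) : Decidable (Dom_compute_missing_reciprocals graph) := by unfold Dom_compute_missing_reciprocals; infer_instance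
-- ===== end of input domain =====

-- B recomputes the same missing-reciprocal dict by an edge-set difference (collect all
-- existing and all required reciprocal edges in one pass, then group the required edges
-- that do not exist) instead of a per-edge lookup inside the nested loop; objective: alternative.

-- ===== PORT A =====
-- the module-level RECIPROCAL dict (shared by both ports, as in the Python module)
def pvRECIPROCAL : PySem.Dict String String :=
  PySem.Dict.mk [("parent","child"),("child","parent"),("wife","husband"),("husband","wife"),("sibling","sibling")]

-- missing[b][t].add(a) on a defaultdict(lambda: defaultdict(set)) (shared: both Pythons use it verbatim)
def pvAddMissing (m : PySem.Dict String (PySem.Dict String (PySem.Set String)))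
    (b t a : String) : PySem.Dict String (PySem.Dict String (PySem.Set String)) :=
  let inner := m.getD b PySem.Dict.empty
  m.insert b (inner.insert t (PySem.Set.add (inner.getD t []) a))

def compute_missing_reciprocals (graph : List (String × List (String × List String))) :
    List (String × List (String × List String)) :=
  let missing : PySem.Dict String (PySem.Dict String (PySem.Set String)) :=
    graph.foldl (fun missing pr =>
      pr.2.foldl (fun missing tr =>
        match PySem.Dict.get? pvRECIPROCAL tr.1 with
        | none => missing                    -- 'if not reciprocal_type: continue'
        | some recip =>
          if recip = "" then missing else    -- (the other falsy case of 'not reciprocal_type')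
          tr.2.foldl (fun missing r =>
            -- 'person not in graph[related_person].get(reciprocal_type, [])';
            -- graph[related_person] raises KeyError when absent: those inputs are outside Pre_
            if pr.1 ∈ (PySem.Dict.mk (((PySem.Dict.mk graph).get? r).getD [])).getD recip []
            then missing
            else pvAddMissing missing r recip pr.1) missing) missing) PySem.Dict.empty
  missing.items.map (fun q => (q.1, q.2.items))

-- ===== PORT B =====
def compute_missing_reciprocals_alt (graph : List (String × List (String × List String))) :
    List (String × List (String × List String)) :=
  -- pass 1: every existing directed edge, and every required reciprocal edge in traversal order
  let er :=
    graph.foldl (fun acc pr =>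
      pr.2.foldl (fun acc tr =>
        let recip? := PySem.Dict.get? pvRECIPROCAL tr.1
        tr.2.foldl (fun acc r =>
          let ex := PySem.Set.add acc.1 (pr.1, tr.1, r)
          match recip? with
          | none => (ex, acc.2)
          | some rc => if rc = "" then (ex, acc.2) else (ex, acc.2 ++ [(r, rc, pr.1)])) acc) acc)
      ((([] : PySem.Set (String × String × String)), ([] : List (String × String × String))))
  -- pass 2: group the required edges that do not exist
  let missing :=
    er.2.foldl (fun missing e =>
      if e ∈ er.1 then missing else pvAddMissing missing e.1 e.2.1 e.2.2)
      (PySem.Dict.empty : PySem.Dict String (PySem.Dict String (PySem.Set String)))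
  missing.items.map (fun q => (q.1, q.2.items))

-- ===== PRECONDITION & SPEC =====
-- Pre_ excludes (a) association lists with duplicate outer or inner keys, which do not
-- represent a Python dict at all, and (b) graphs where a reciprocal-typed edge points to a
-- person absent from the graph, on which A raises KeyError.
def Pre_compute_missing_reciprocals (graph : List (String × List (String × List String))) : Prop :=
  (graph.map Prod.fst).Nodup ∧
  (∀ pr ∈ graph, (pr.2.map Prod.fst).Nodup) ∧
  (∀ pr ∈ graph, ∀ tr ∈ pr.2, (PySem.Dict.get? pvRECIPROCAL tr.1).isSome = true →
    ∀ r ∈ tr.2, r ∈ graph.map Prod.fst)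
instance (graph : List (String × List (String × List String))) : Decidable (Pre_compute_missing_reciprocals graph) := by unfold Pre_compute_missing_reciprocals; infer_instance
def pvWitness_compute_missing_reciprocals : (List (String × List (String × List String))) :=
  [("a", [("parent", ["b"])]), ("b", [("friend", ["a"])])]

def Spec_compute_missing_reciprocals (graph : List (String × List (String × List String))) (out : List (String × List (String × List String))) : Prop := out = compute_missing_reciprocals_alt graph
instance (graph : List (String × List (String × List String))) (out : List (String × List (String × List String))) : Decidable (Spec_compute_missing_reciprocals graph out) := by unfold Spec_compute_missing_reciprocals; infer_instance

-- ===== CLAIM (what is proved, stated in full; the proofs are below) =====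
def Claim_equal_compute_missing_reciprocals : Prop := ∀ (graph : List (String × List (String × List String))), Dom_compute_missing_reciprocals graph → Pre_compute_missing_reciprocals graph → Spec_compute_missing_reciprocals graph (compute_missing_reciprocals graph)

-- ===== LEMMAS AND PROOFS =====

-- all existing directed edges (person, rel_type, related_person), in traversal order
def pvEdges (graph : List (String × List (String × List String))) : List (String × String × String) :=
  graph.flatMap (fun pr => pr.2.flatMap (fun tr => tr.2.map (fun r => (pr.1, tr.1, r))))

-- all required reciprocal edges (related_person, reciprocal_type, person), in traversal order
def pvReqs (graph : List (String × List (String × List String))) : List (String × String × String) :=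
  graph.flatMap (fun pr => pr.2.flatMap (fun tr =>
    match PySem.Dict.get? pvRECIPROCAL tr.1 with
    | none => []
    | some rc => if rc = "" then [] else tr.2.map (fun r => (r, rc, pr.1))))

lemma pvA_eq_foldl_reqs (graph : List (String × List (String × List String))) :
    compute_missing_reciprocals graph =
    ((pvReqs graph).foldl
      (fun m e => if e.2.2 ∈ (PySem.Dict.mk (((PySem.Dict.mk graph).get? e.1).getD [])).getD e.2.1 [] then m else pvAddMissing m e.1 e.2.1 e.2.2)
      PySem.Dict.empty).items.map (fun q => (q.1, q.2.items)) := by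
  simp only [compute_missing_reciprocals, pvReqs]
  rw [List.foldl_flatMap]
  congr 2
  apply PySem.List.foldl_congr_mem
  intro m pr _
  rw [List.foldl_flatMap]
  apply PySem.List.foldl_congr_mem
  intro m' tr _
  cases hc : PySem.Dict.get? pvRECIPROCAL tr.1 with
  | none => simp
  | some rc =>
    by_cases hrc : rc = ""
    · simp [hrc]
    · simp only [hrc, if_false]
      rw [List.foldl_map]

lemma pvB_people (p t : String) (recip? : Option String) (people : List String)
    (acc : PySem.Set (String × String × String) × List (String × String × String)) :
    people.foldl (fun acc r =>
        let ex := PySem.Set.add acc.1 (p, t, r)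
        match recip? with
        | none => (ex, acc.2)
        | some rc => if rc = "" then (ex, acc.2) else (ex, acc.2 ++ [(r, rc, p)])) acc
      = ((people.map (fun r => (p, t, r))).foldl PySem.Set.add acc.1,
         acc.2 ++ (match recip? with
           | none => []
           | some rc => if rc = "" then [] else people.map (fun r => (r, rc, p)))) := by
  induction people generalizing acc with
  | nil =>
    cases recip? with
    | none => simp
    | some rc => by_cases hrc : rc = "" <;> simp [hrc]
  | cons r rest ih =>
    rw [List.foldl_cons, ih]
    cases recip? with
    | none => simp
    | some rc => by_cases hrc : rc = "" <;> simp [hrc]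

lemma pvB_rels (p : String) (rels : List (String × List String))
    (acc : PySem.Set (String × String × String) × List (String × String × String)) :
    rels.foldl (fun acc tr =>
        let recip? := PySem.Dict.get? pvRECIPROCAL tr.1
        tr.2.foldl (fun acc r =>
          let ex := PySem.Set.add acc.1 (p, tr.1, r)
          match recip? with
          | none => (ex, acc.2)
          | some rc => if rc = "" then (ex, acc.2) else (ex, acc.2 ++ [(r, rc, p)])) acc) acc
      = ((rels.flatMap (fun tr => tr.2.map (fun r => (p, tr.1, r)))).foldl PySem.Set.add acc.1,
         acc.2 ++ rels.flatMap (fun tr =>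
           match PySem.Dict.get? pvRECIPROCAL tr.1 with
           | none => []
           | some rc => if rc = "" then [] else tr.2.map (fun r => (r, rc, p)))) := by
  induction rels generalizing acc with
  | nil => simp
  | cons tr rest ih =>
    rw [List.foldl_cons, ih]
    simp only [pvB_people]
    simp [List.foldl_append, List.append_assoc]

lemma pvB_graph (graph : List (String × List (String × List String))) :
    graph.foldl (fun acc pr =>
      pr.2.foldl (fun acc tr =>
        let recip? := PySem.Dict.get? pvRECIPROCAL tr.1
        tr.2.foldl (fun acc r =>
          let ex := PySem.Set.add acc.1 (pr.1, tr.1, r)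
          match recip? with
          | none => (ex, acc.2)
          | some rc => if rc = "" then (ex, acc.2) else (ex, acc.2 ++ [(r, rc, pr.1)])) acc) acc)
      ((([] : PySem.Set (String × String × String)), ([] : List (String × String × String))))
      = ((pvEdges graph).foldl PySem.Set.add [], pvReqs graph) := by
  suffices h : ∀ (acc : PySem.Set (String × String × String) × List (String × String × String)),
      graph.foldl (fun acc pr =>
        pr.2.foldl (fun acc tr =>
          let recip? := PySem.Dict.get? pvRECIPROCAL tr.1
          tr.2.foldl (fun acc r =>
            let ex := PySem.Set.add acc.1 (pr.1, tr.1, r)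
            match recip? with
            | none => (ex, acc.2)
            | some rc => if rc = "" then (ex, acc.2) else (ex, acc.2 ++ [(r, rc, pr.1)])) acc) acc) acc
        = ((pvEdges graph).foldl PySem.Set.add acc.1, acc.2 ++ pvReqs graph) by
    simpa using h ([], [])
  induction graph with
  | nil => intro acc; simp [pvEdges, pvReqs]
  | cons pr rest ih =>
    intro acc
    rw [List.foldl_cons, ih]
    simp only [pvB_rels]
    simp [pvEdges, pvReqs, List.foldl_append, List.append_assoc]

lemma pvB_er (graph : List (String × List (String × List String))) :
    (graph.foldl (fun acc pr =>
      pr.2.foldl (fun acc tr =>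
        let recip? := PySem.Dict.get? pvRECIPROCAL tr.1
        tr.2.foldl (fun acc r =>
          let ex := PySem.Set.add acc.1 (pr.1, tr.1, r)
          match recip? with
          | none => (ex, acc.2)
          | some rc => if rc = "" then (ex, acc.2) else (ex, acc.2 ++ [(r, rc, pr.1)])) acc) acc)
      ((([] : PySem.Set (String × String × String)), ([] : List (String × String × String))))).2
      = pvReqs graph
    ∧ ∀ x, (x ∈ (graph.foldl (fun acc pr =>
      pr.2.foldl (fun acc tr =>
        let recip? := PySem.Dict.get? pvRECIPROCAL tr.1
        tr.2.foldl (fun acc r =>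
          let ex := PySem.Set.add acc.1 (pr.1, tr.1, r)
          match recip? with
          | none => (ex, acc.2)
          | some rc => if rc = "" then (ex, acc.2) else (ex, acc.2 ++ [(r, rc, pr.1)])) acc) acc)
      ((([] : PySem.Set (String × String × String)), ([] : List (String × String × String))))).1
      ↔ x ∈ pvEdges graph) := by
  rw [pvB_graph]
  refine ⟨rfl, fun x => ?_⟩
  rw [← PySem.Set.ofList_eq_foldl]
  exact PySem.Set.mem_ofList _ _

lemma pvCond_iff (graph : List (String × List (String × List String)))
    (hPre : Pre_compute_missing_reciprocals graph) :
    ∀ e ∈ pvReqs graph, ((e.2.2 ∈ (PySem.Dict.mk (((PySem.Dict.mk graph).get? e.1).getD [])).getD e.2.1 []) ↔ e ∈ pvEdges graph) := by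
  obtain ⟨hnd1, hnd2, hkeys⟩ := hPre
  intro e he
  simp only [pvReqs, List.mem_flatMap] at he
  obtain ⟨pr, hpr, tr, htr, he⟩ := he
  cases hc : PySem.Dict.get? pvRECIPROCAL tr.1 with
  | none => rw [hc] at he; simp at he
  | some rc =>
    rw [hc] at he
    by_cases hrc : rc = ""
    · simp [hrc] at he
    · simp only [hrc, if_false, List.mem_map] at he
      obtain ⟨r, hr, rfl⟩ := he
      have hb : r ∈ graph.map Prod.fst := hkeys pr hpr tr htr (by simp [hc]) r hr
      obtain ⟨pr', hpr', hfst⟩ := List.mem_map.mp hb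
      have hndk : (PySem.Dict.mk graph).keys.Nodup := by
        simpa [PySem.Dict.keys] using hnd1
      have hget : (PySem.Dict.mk graph).get? r = some pr'.2 :=
        PySem.Dict.get?_of_mem_items _ (by rw [← hfst]; exact hpr') hndk
      have hndk2 : (PySem.Dict.mk pr'.2).keys.Nodup := by
        simpa [PySem.Dict.keys] using hnd2 pr' hpr'
      simp only [hget, Option.getD_some]
      rw [PySem.Dict.getD_eq_get?_getD]
      have huniq : ∀ pr'' ∈ graph, pr''.1 = r → pr''.2 = pr'.2 := by
        intro pr'' hpr'' hfst''
        have := PySem.Dict.get?_of_mem_items (PySem.Dict.mk graph)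
          (k := r) (v := pr''.2) (by rw [← hfst'']; exact hpr'') hndk
        rw [hget] at this
        exact (Option.some.inj this).symm
      cases hin : (PySem.Dict.mk pr'.2).get? rc with
      | none =>
        simp only [Option.getD_none]
        constructor
        · intro h; exact absurd h (List.not_mem_nil)
        · intro h
          exfalso
          simp only [pvEdges, List.mem_flatMap, List.mem_map] at h
          obtain ⟨pr'', hpr'', tr'', htr'', r'', hr'', heq⟩ := h
          have h1 : pr''.1 = r := congrArg Prod.fst heq
          have h2 : tr''.1 = rc := congrArg (fun x => x.2.1) heq
          have hsub : tr'' ∈ pr'.2 := huniq pr'' hpr'' h1 ▸ htr''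
          have hget2 : (PySem.Dict.mk pr'.2).get? rc = some tr''.2 :=
            PySem.Dict.get?_of_mem_items _ (by rw [← h2]; simpa using hsub) hndk2
          rw [hin] at hget2
          simp at hget2
      | some w =>
        simp only [Option.getD_some]
        constructor
        · intro hmem
          have hw : (rc, w) ∈ pr'.2 := PySem.Dict.mem_items_of_get?_eq_some _ hin
          simp only [pvEdges, List.mem_flatMap, List.mem_map]
          exact ⟨pr', hpr', (rc, w), hw, ⟨(pr.1 : String), hmem, by rw [hfst]⟩⟩
        · intro h
          simp only [pvEdges, List.mem_flatMap, List.mem_map] at h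
          obtain ⟨pr'', hpr'', tr'', htr'', r'', hr'', heq⟩ := h
          have h1 : pr''.1 = r := congrArg Prod.fst heq
          have h2 : tr''.1 = rc := congrArg (fun x => x.2.1) heq
          have h3 : r'' = pr.1 := congrArg (fun x => x.2.2) heq
          have hsub : tr'' ∈ pr'.2 := huniq pr'' hpr'' h1 ▸ htr''
          have hget2 : (PySem.Dict.mk pr'.2).get? rc = some tr''.2 :=
            PySem.Dict.get?_of_mem_items _ (by rw [← h2]; simpa using hsub) hndk2
          rw [hin] at hget2
          have hw' : w = tr''.2 := Option.some.inj hget2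
          rw [hw', ← h3]
          exact hr''

-- ===== VERDICT (by name: the statement is the Claim_ definition above) =====
theorem compute_missing_reciprocals_spec : Claim_equal_compute_missing_reciprocals := by
  intro graph _ hPre
  unfold Spec_compute_missing_reciprocals
  rw [pvA_eq_foldl_reqs]
  simp only [compute_missing_reciprocals_alt]
  obtain ⟨h2, h1⟩ := pvB_er graph
  rw [h2]
  congr 2
  apply PySem.List.foldl_congr_mem
  intro m e he
  have h3 := (pvCond_iff graph hPre e he).trans (h1 e).symm
  exact if_congr h3 rfl rfl
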